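-- pv_equiv track=rewrite | github.com/richarddahl/notorm | devtools/docs/renderers.py | _render_models_index
-- ===== SOURCE A (Python) =====
-- from typing import Dict, List, Optional, Any, Set, Union
--
-- def _render_models_index(models: list[dict[str, Any]]) -> str:
--     """
--     Render models index.
--
--     Args:
--         models: List of model data
--
--     Returns:
--         Rendered models index content
--     """
--     lines = []
--     lines.append("# Data Models")
--     lines.append("")
--     lines.append("This section contains documentation for all data models.")
--     lines.append("")
--
--     # Group models by module
--     models_by_module = {}
--     for model in models:
--         module = model.get("module", "Default")
--         if module not in models_by_module:
--             models_by_module[module] = []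
--         models_by_module[module].append(model)
--
--     # Add models by module
--     for module, module_models in sorted(models_by_module.items()):
--         lines.append(f"## {module}")
--         lines.append("")
--
--         for model in module_models:
--             model_name = model["name"]
--             desc = (
--                 model.get("description", "").split(".")[0] + "."
--                 if model.get("description")
--                 else ""
--             )
--
--             lines.append(f"- [{model_name}]({model_name}.md): {desc}")
--
--         lines.append("")
--
--     return "\n".join(lines)
-- ===== SOURCE B (Python) =====
-- def _render_models_index(models: list) -> str:
--     """Alternative decomposition: sorted distinct module keys + a filter pass
--     per module, instead of building a module->list dict."""
--     key = lambda m: m.get("module", "Default")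
--     lines = [
--         "# Data Models",
--         "",
--         "This section contains documentation for all data models.",
--         "",
--     ]
--     for module in sorted(dict.fromkeys(key(m) for m in models)):
--         lines.append(f"## {module}")
--         lines.append("")
--         for model in (m for m in models if key(m) == module):
--             name = model["name"]
--             d = model.get("description", "")
--             lines.append(f"- [{name}]({name}.md): {d.split('.')[0] + '.' if d else ''}")
--         lines.append("")
--     return "\n".join(lines)
-- ===== Notes on version B (the rewrite author's own statement) =====
-- stated objective: alternative
-- what changed: B drops the module->list dict grouping: it computes the sorted distinct module keys (dict.fromkeys dedup) and emits each group with a per-module filter pass over the input list.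
import Mathlib
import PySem

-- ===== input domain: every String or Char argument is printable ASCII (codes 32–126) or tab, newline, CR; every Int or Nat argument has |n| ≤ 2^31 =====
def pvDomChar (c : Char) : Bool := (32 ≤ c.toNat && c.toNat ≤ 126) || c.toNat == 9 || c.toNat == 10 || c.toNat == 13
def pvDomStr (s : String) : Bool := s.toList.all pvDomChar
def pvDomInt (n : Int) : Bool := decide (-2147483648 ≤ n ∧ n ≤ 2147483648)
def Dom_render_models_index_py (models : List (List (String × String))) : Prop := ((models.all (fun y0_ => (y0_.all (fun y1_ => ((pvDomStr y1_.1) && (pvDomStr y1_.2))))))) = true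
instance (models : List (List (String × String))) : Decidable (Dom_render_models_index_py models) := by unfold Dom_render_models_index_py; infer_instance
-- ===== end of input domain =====

-- B replaces A's dict grouping by sorted distinct module keys + one filter pass per module (alternative decomposition, not claimed faster).

-- ===== PORT A =====
-- model.get("module", "Default")
def pvModKey (model : List (String × String)) : String :=
  (PySem.Dict.mk model).getD "module" "Default"

-- the f-string "- [{model_name}]({model_name}.md): {desc}" with its desc computation;
-- model["name"] is exact under Pre_ (the "name" key is present); split(".") is never empty, so [0] = headD.
def pvEntryLine (model : List (String × String)) : String :=
  let name := (PySem.Dict.mk model).getD "name" ""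
  let d := (PySem.Dict.mk model).getD "description" ""
  let desc := if d = "" then "" else ((PySem.Str.split? d ".").getD []).headD "" ++ "."
  "- [" ++ name ++ "](" ++ name ++ ".md): " ++ desc

def render_models_index_py (models : List (List (String × String))) : String :=
  let lines : List String :=
    ["# Data Models", "", "This section contains documentation for all data models.", ""]
  let d := models.foldl (fun d model =>
      let module := pvModKey model
      let d := if d.contains module then d
               else d.insert module ([] : List (List (String × String)))
      d.modify module [] (fun g => g ++ [model]))
    (PySem.Dict.empty : PySem.Dict String (List (List (String × String))))
  -- sorted(models_by_module.items()): dict keys are distinct, so Python's tuple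
  -- comparison here is exactly comparison on the module key (the first component)
  let sortedItems := PySem.List.sorted d.items (fun p => p.1) false
  let lines := sortedItems.foldl (fun lines p =>
      let lines := lines ++ ["## " ++ p.1, ""]
      let lines := p.2.foldl (fun lines model => lines ++ [pvEntryLine model]) lines
      lines ++ [""]) lines
  PySem.Str.join "\n" lines

-- ===== PORT B =====
def render_models_index_py_alt (models : List (List (String × String))) : String :=
  let header : List String :=
    ["# Data Models", "", "This section contains documentation for all data models.", ""]
  let mods := PySem.List.sorted (PySem.List.dedup (models.map pvModKey)) (fun x => x) false
  let body := mods.flatMap (fun module =>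
      ["## " ++ module, ""]
        ++ (models.filter (fun m => pvModKey m == module)).map pvEntryLine
        ++ [""])
  PySem.Str.join "\n" (header ++ body)

-- ===== PRECONDITION & SPEC =====
-- Pre_ excludes exactly the inputs where A raises KeyError: some model has no "name" key (B raises there too).
def Pre_render_models_index_py (models : List (List (String × String))) : Prop :=
  (models.all (fun m => (PySem.Dict.mk m).contains "name")) = true
instance (models : List (List (String × String))) : Decidable (Pre_render_models_index_py models) := by
  unfold Pre_render_models_index_py; infer_instance
def pvWitness_render_models_index_py : (List (List (String × String))) :=
  [[("name", "User"), ("module", "auth"), ("description", "A user. More.")], [("name", "Post")]]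
def Spec_render_models_index_py (models : List (List (String × String))) (out : String) : Prop := out = render_models_index_py_alt models
instance (models : List (List (String × String))) (out : String) : Decidable (Spec_render_models_index_py models out) := by unfold Spec_render_models_index_py; infer_instance

-- ===== CLAIM (what is proved, stated in full; the proofs are below) =====
def Claim_equal_render_models_index_py : Prop := ∀ (models : List (List (String × String))), Dom_render_models_index_py models → Pre_render_models_index_py models → Spec_render_models_index_py models (render_models_index_py models)

-- ===== LEMMAS AND PROOFS =====

-- the conditional "insert [] if absent, then append" of A is one Dict.modify step
theorem pv_insert_modify_absorb {V : Type} (d : PySem.Dict String (List V)) (k : String)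
    (f : List V → List V) :
    (if d.contains k then d else d.insert k ([] : List V)).modify k [] f
      = d.modify k [] f := by
  unfold PySem.Dict.modify
  split
  · rfl
  · next h =>
    rw [PySem.Dict.getD_insert_self, PySem.Dict.insert_insert_self,
        PySem.Dict.getD_of_not_contains]
    simpa using h

-- appending one element per iteration is map
theorem pv_foldl_append_singleton {α β : Type} (l : List α) (f : α → β) (acc : List β) :
    l.foldl (fun a x => a ++ [f x]) acc = acc ++ l.map f := by
  induction l generalizing acc with
  | nil => simp
  | cons x xs ih => simp [List.foldl, ih, List.append_assoc]

-- A's outer loop over groups is a flatMap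
theorem pv_outer_foldl (l : List (String × List (List (String × String))))
    (acc : List String) :
    l.foldl (fun lines p =>
        ((p.2.foldl (fun lines model => lines ++ [pvEntryLine model])
            (lines ++ ["## " ++ p.1, ""])) ++ [""])) acc
      = acc ++ l.flatMap (fun p => ["## " ++ p.1, ""] ++ p.2.map pvEntryLine ++ [""]) := by
  induction l generalizing acc with
  | nil => simp
  | cons p ps ih =>
    rw [List.foldl_cons, pv_foldl_append_singleton, ih]
    simp [List.append_assoc]

-- the grouping dict's items, characterised
theorem pv_items_char (models : List (List (String × String))) :
    (models.foldl (fun d model =>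
        (if d.contains (pvModKey model) then d
         else d.insert (pvModKey model) ([] : List (List (String × String)))).modify
          (pvModKey model) [] (fun g => g ++ [model]))
      (PySem.Dict.empty : PySem.Dict String (List (List (String × String))))).items
    = (PySem.Set.ofList (models.map pvModKey)).map
        (fun k => (k, models.filter (fun m => pvModKey m == k))) := by
  simp only [pv_insert_modify_absorb]
  have hstep : (models.foldl (fun d model =>
        d.modify (pvModKey model) [] (fun g => g ++ [model]))
      (PySem.Dict.empty : PySem.Dict String (List (List (String × String)))))
      = ((models.map (fun m => (pvModKey m, m))).foldl
          (fun d p => d.modify p.1 [] (fun g => g ++ [p.2]))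
          (PySem.Dict.empty : PySem.Dict String (List (List (String × String))))) := by
    rw [List.foldl_map]
  rw [hstep]
  have hnd : ((models.map (fun m => (pvModKey m, m))).foldl
      (fun d p => d.modify p.1 [] (fun g => g ++ [p.2]))
      (PySem.Dict.empty : PySem.Dict String (List (List (String × String))))).keys.Nodup :=
    PySem.Dict.nodup_keys_foldl_modify_key _ _ _ _ _ PySem.Dict.nodup_keys_empty
  rw [PySem.Dict.items_eq_map_keys _ hnd []]
  rw [PySem.Dict.keys_foldl_modify_key]
  simp only [PySem.Dict.keys_empty, List.map_map]
  have hupd : PySem.Set.update ([] : List String)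
        (models.map (Prod.fst ∘ fun m => (pvModKey m, m)))
      = PySem.Set.ofList (models.map pvModKey) := by
    simp only [Function.comp_def]
    rfl
  rw [hupd]
  refine List.map_congr_left (fun k hk => ?_)
  rw [PySem.Dict.getD_foldl_modify_append]
  simp [List.filter_map, Function.comp_def]

-- sorting the grouped items by module key is mapping the group function over the sorted keys
theorem pv_sorted_items (models : List (List (String × String))) :
    PySem.List.sorted ((PySem.Set.ofList (models.map pvModKey)).map
        (fun k => (k, models.filter (fun m => pvModKey m == k)))) (fun p => p.1) false
      = (PySem.List.sorted (PySem.Set.ofList (models.map pvModKey)) (fun x => x) false).map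
          (fun k => (k, models.filter (fun m => pvModKey m == k))) := by
  apply PySem.List.sorted_eq_of_perm_of_pairwise_lt
  · exact (PySem.List.sorted_perm _ _ _).map _
  · exact (PySem.List.sorted_ofList_pairwise_lt _).map _ (fun a b h => h)

-- ===== VERDICT (by name: the statement is the Claim_ definition above) =====
theorem render_models_index_py_spec : Claim_equal_render_models_index_py := by
  intro models _ _
  unfold Spec_render_models_index_py render_models_index_py render_models_index_py_alt
  dsimp only
  rw [pv_items_char, pv_sorted_items, pv_outer_foldl]
  simp [List.flatMap_map]
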